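-- pv_equiv track=rewrite | github.com/Filpped/LDPatch | relibrary/analysis/patchSumAnalysis.py | calculate_patch_counts_for_all_packages
-- ===== SOURCE A (Python) =====
-- def calculate_patch_counts_for_package(package_data):
--     """
--     计算单个软件包的补丁数量
--
--     Args:
--         package_data: 软件包补丁数据
--
--     Returns:
--         tuple: (fedora补丁数量, openeuler补丁数量)
--     """
--     common_patches = package_data.get("common_patches", [])
--     unique_fedora_patches = package_data.get("unique_fedora_patches", [])
--     unique_openeuler_patches = package_data.get("unique_openeuler_patches", [])
--     same_content_different_names = package_data.get("same_content_different_names", [])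
--
--     # 计算补丁数量
--     fedora_patches_count = len(common_patches) + len(unique_fedora_patches) + len(same_content_different_names)
--     openeuler_patches_count = len(common_patches) + len(unique_openeuler_patches) + len(same_content_different_names)
--
--     return fedora_patches_count, openeuler_patches_count
--
-- def calculate_patch_counts_for_all_packages(data):
--     """
--     计算所有软件包的补丁数量和总数量
--
--     Args:
--         data: 包含所有软件包补丁数据的字典
--
--     Returns:
--         tuple: (每个包的补丁数量字典, fedora总补丁数, openeuler总补丁数)
--     """
--     packages_comparison = data.get("packages_comparison", {})
--     results = {}
--
--     # 初始化补丁总数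
--     total_fedora_patches = 0
--     total_openeuler_patches = 0
--
--     # 计算每个软件包的补丁数量，并累加到总数
--     for package_name, package_data in packages_comparison.items():
--         fedora_count, openeuler_count = calculate_patch_counts_for_package(package_data)
--         results[package_name] = {
--             "fedora_patches_count": fedora_count,
--             "openeuler_patches_count": openeuler_count
--         }
--         total_fedora_patches += fedora_count
--         total_openeuler_patches += openeuler_count
--
--     return results, total_fedora_patches, total_openeuler_patches
-- ===== SOURCE B (Python) =====
-- def calculate_patch_counts_for_all_packages(data):
--     items = list(data.get("packages_comparison", {}).items())
--
--     def counts(pd):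
--         c = len(pd.get("common_patches", []))
--         s = len(pd.get("same_content_different_names", []))
--         return (c + len(pd.get("unique_fedora_patches", [])) + s,
--                 c + len(pd.get("unique_openeuler_patches", [])) + s)
--
--     def solve(its):
--         # divide and conquer: results dict and both totals merged from the two halves
--         if not its:
--             return {}, 0, 0
--         if len(its) == 1:
--             name, pd = its[0]
--             f, o = counts(pd)
--             return {name: {"fedora_patches_count": f,
--                            "openeuler_patches_count": o}}, f, o
--         mid = len(its) // 2
--         lres, lf, lo = solve(its[:mid])
--         rres, rf, ro = solve(its[mid:])
--         lres.update(rres)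
--         return lres, lf + rf, lo + ro
--
--     return solve(items)
-- ===== Notes on version B (the rewrite author's own statement) =====
-- stated objective: alternative
-- what changed: Replaces A's single left-to-right loop with running totals by a divide-and-conquer recursion: the item list is split in half, each half solved recursively, and the per-package dicts and the two totals are merged from the sub-results.
import Mathlib
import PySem

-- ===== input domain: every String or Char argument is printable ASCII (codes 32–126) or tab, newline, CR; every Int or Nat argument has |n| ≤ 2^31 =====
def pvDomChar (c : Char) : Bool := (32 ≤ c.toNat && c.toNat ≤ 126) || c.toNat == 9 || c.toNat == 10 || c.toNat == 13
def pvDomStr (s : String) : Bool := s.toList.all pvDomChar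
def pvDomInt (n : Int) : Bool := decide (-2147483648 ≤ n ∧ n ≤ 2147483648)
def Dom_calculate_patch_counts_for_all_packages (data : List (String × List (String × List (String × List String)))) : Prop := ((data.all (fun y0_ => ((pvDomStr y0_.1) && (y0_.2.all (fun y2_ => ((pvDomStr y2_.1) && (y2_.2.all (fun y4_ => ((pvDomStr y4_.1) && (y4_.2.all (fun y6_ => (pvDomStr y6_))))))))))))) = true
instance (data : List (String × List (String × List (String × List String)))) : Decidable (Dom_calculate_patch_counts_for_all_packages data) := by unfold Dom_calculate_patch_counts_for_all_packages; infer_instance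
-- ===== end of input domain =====

-- B replaces A's single left-to-right loop with running totals by a divide-and-conquer
-- recursion that splits the item list in half and merges sub-results; alternative, same result.


-- ===== PORT A =====
-- helper: calculate_patch_counts_for_package (literal; dict .get(k, []) = Dict.getD)
def calculate_patch_counts_for_package (package_data : List (String × List String)) : Int × Int :=
  let d := PySem.Dict.ofList package_data
  let common_patches := d.getD "common_patches" []
  let unique_fedora_patches := d.getD "unique_fedora_patches" []
  let unique_openeuler_patches := d.getD "unique_openeuler_patches" []
  let same_content_different_names := d.getD "same_content_different_names" []
  let fedora_patches_count : Int := common_patches.length + unique_fedora_patches.length + same_content_different_names.length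
  let openeuler_patches_count : Int := common_patches.length + unique_openeuler_patches.length + same_content_different_names.length
  (fedora_patches_count, openeuler_patches_count)

def calculate_patch_counts_for_all_packages (data : List (String × List (String × List (String × List String)))) : (List (String × List (String × Int))) × Int × Int :=
  let packages_comparison := (PySem.Dict.ofList data).getD "packages_comparison" []
  -- one loop: results dict insert and both running totals together
  let st := (PySem.Dict.ofList packages_comparison).items.foldl
    (fun (st : PySem.Dict String (List (String × Int)) × Int × Int) p =>
      let (fedora_count, openeuler_count) := calculate_patch_counts_for_package p.2
      (st.1.insert p.1 [("fedora_patches_count", fedora_count), ("openeuler_patches_count", openeuler_count)],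
       st.2.1 + fedora_count, st.2.2 + openeuler_count))
    (PySem.Dict.empty, 0, 0)
  (st.1.items, st.2.1, st.2.2)

-- ===== PORT B =====
-- helper counts(pd) of Source B
def pvCounts (pd : List (String × List String)) : Int × Int :=
  let d := PySem.Dict.ofList pd
  let c : Int := (d.getD "common_patches" []).length
  let s : Int := (d.getD "same_content_different_names" []).length
  (c + (d.getD "unique_fedora_patches" []).length + s,
   c + (d.getD "unique_openeuler_patches" []).length + s)

-- helper solve(its) of Source B: divide and conquer; its[:mid]/its[mid:] with 0 ≤ mid ≤ len are
-- exactly List.take/List.drop, len(its)//2 on a nonnegative length is Nat division (exact);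
-- lres.update(rres) is the foldl of insert over rres's items.
def pvSolve : List (String × List (String × List String)) → PySem.Dict String (List (String × Int)) × Int × Int
  | [] => (PySem.Dict.empty, 0, 0)
  | p :: rest =>
    if rest = [] then
      let (f, o) := pvCounts p.2
      (PySem.Dict.ofList [(p.1, [("fedora_patches_count", f), ("openeuler_patches_count", o)])], f, o)
    else
      let mid := (p :: rest).length / 2
      let L := pvSolve ((p :: rest).take mid)
      let R := pvSolve ((p :: rest).drop mid)
      (R.1.items.foldl (fun d q => d.insert q.1 q.2) L.1, L.2.1 + R.2.1, L.2.2 + R.2.2)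
termination_by its => its.length
decreasing_by
  · rename_i h
    have := List.length_pos_of_ne_nil h
    simp only [List.length_take, List.length_cons]
    omega
  · rename_i h
    have := List.length_pos_of_ne_nil h
    simp only [List.length_drop, List.length_cons]
    omega

def calculate_patch_counts_for_all_packages_alt (data : List (String × List (String × List (String × List String)))) : (List (String × List (String × Int))) × Int × Int :=
  let items := (PySem.Dict.ofList ((PySem.Dict.ofList data).getD "packages_comparison" [])).items
  let r := pvSolve items
  (r.1.items, r.2.1, r.2.2)

-- ===== PRECONDITION & SPEC =====
def Spec_calculate_patch_counts_for_all_packages (data : List (String × List (String × List (String × List String)))) (out : (List (String × List (String × Int))) × Int × Int) : Prop := out = calculate_patch_counts_for_all_packages_alt data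
instance (data : List (String × List (String × List (String × List String)))) (out : (List (String × List (String × Int))) × Int × Int) : Decidable (Spec_calculate_patch_counts_for_all_packages data out) := by unfold Spec_calculate_patch_counts_for_all_packages; infer_instance

-- ===== CLAIM (what is proved, stated in full; the proofs are below) =====
def Claim_equal_calculate_patch_counts_for_all_packages : Prop := ∀ (data : List (String × List (String × List (String × List String)))), Dom_calculate_patch_counts_for_all_packages data → Spec_calculate_patch_counts_for_all_packages data (calculate_patch_counts_for_all_packages data)

-- ===== LEMMAS AND PROOFS =====

-- the value-dict each package contributes
def pvMkVal (pd : List (String × List String)) : List (String × Int) :=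
  [("fedora_patches_count", (calculate_patch_counts_for_package pd).1),
   ("openeuler_patches_count", (calculate_patch_counts_for_package pd).2)]

theorem pvCounts_eq (pd : List (String × List String)) :
    pvCounts pd = calculate_patch_counts_for_package pd := by
  simp [pvCounts, calculate_patch_counts_for_package]

-- A's combined loop splits into the dict loop and the two sums
theorem pvA_foldl (l : List (String × List (String × List String)))
    (r : PySem.Dict String (List (String × Int))) (tf t2 : Int) :
    l.foldl
      (fun (st : PySem.Dict String (List (String × Int)) × Int × Int) p =>
        let (fedora_count, openeuler_count) := calculate_patch_counts_for_package p.2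
        (st.1.insert p.1 [("fedora_patches_count", fedora_count), ("openeuler_patches_count", openeuler_count)],
         st.2.1 + fedora_count, st.2.2 + openeuler_count))
      (r, tf, t2)
    = (l.foldl (fun r p => r.insert p.1 (pvMkVal p.2)) r,
       tf + (l.map (fun p => (calculate_patch_counts_for_package p.2).1)).sum,
       t2 + (l.map (fun p => (calculate_patch_counts_for_package p.2).2)).sum) := by
  induction l generalizing r tf t2 with
  | nil => simp
  | cons p l ih =>
    simp only [List.foldl_cons, List.map_cons, List.sum_cons, ih, pvMkVal]
    ring_nf

theorem pvKeysNodupMap (l : List (String × List (String × List String)))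
    (h : (l.map (·.1)).Nodup) :
    (l.foldl (fun (r : PySem.Dict String (List (String × Int))) p => r.insert p.1 (pvMkVal p.2)) PySem.Dict.empty).items
    = l.map (fun p => (p.1, pvMkVal p.2)) := by
  have := PySem.Dict.items_foldl_insert_fresh (l := l) (k := (·.1)) (v := fun p => pvMkVal p.2)
    (d := PySem.Dict.empty) (by simp) h
  simpa using this


theorem pvSolve_eq (l : List (String × List (String × List String)))
    (h : (l.map (·.1)).Nodup) :
    pvSolve l
    = ((PySem.Dict.mk (l.map (fun p => (p.1, pvMkVal p.2)))),
       (l.map (fun p => (calculate_patch_counts_for_package p.2).1)).sum,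
       (l.map (fun p => (calculate_patch_counts_for_package p.2).2)).sum) := by
  induction l using pvSolve.induct with
  | case1 => simp [pvSolve, PySem.Dict.empty]
  | case2 p f o hfo =>
    simp [pvSolve, hfo, pvMkVal, ← pvCounts_eq, PySem.Dict.ofList]
    apply PySem.Dict.ext
    simp [PySem.Dict.update, PySem.Dict.items_insert_of_not_contains, PySem.Dict.empty]
  | case3 p rest h1 mid ihT ihD =>
    have hT : ((List.take ((p :: rest).length / 2) (p :: rest)).map (·.1)).Nodup :=
      (((List.take_sublist _ _).map _)).nodup h
    have hD : ((List.drop ((p :: rest).length / 2) (p :: rest)).map (·.1)).Nodup :=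
      (((List.drop_sublist _ _).map _)).nodup h
    have hsplit : (p :: rest).map (·.1)
        = (List.take ((p :: rest).length / 2) (p :: rest)).map (·.1)
          ++ (List.drop ((p :: rest).length / 2) (p :: rest)).map (·.1) := by
      rw [← List.map_append, List.take_append_drop]
    have hdisj : ∀ a ∈ (List.drop ((p :: rest).length / 2) (p :: rest)).map (·.1),
        a ∉ (List.take ((p :: rest).length / 2) (p :: rest)).map (·.1) := by
      have := h
      rw [hsplit] at this
      intro a ha hb
      exact (List.disjoint_of_nodup_append this) hb ha
    simp only [pvSolve, if_neg h1]
    rw [ihT hT, ihD hD]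
    have hfold := PySem.Dict.items_foldl_insert_fresh
      (l := (List.drop ((p :: rest).length / 2) (p :: rest)).map (fun q => (q.1, pvMkVal q.2)))
      (k := Prod.fst) (v := Prod.snd)
      (d := PySem.Dict.mk ((List.take ((p :: rest).length / 2) (p :: rest)).map (fun q => (q.1, pvMkVal q.2))))
      (by
        intro a ha
        obtain ⟨q, hq, rfl⟩ := List.mem_map.mp ha
        have hnot : q.1 ∉ (List.take ((p :: rest).length / 2) (p :: rest)).map (·.1) :=
          hdisj q.1 (List.mem_map_of_mem hq)
        by_contra hc
        rw [Bool.not_eq_false, PySem.Dict.contains_iff_mem_keys] at hc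
        simp only [PySem.Dict.keys, List.map_map, Function.comp_def] at hc
        exact hnot (by simpa using hc))
      (by simpa [List.map_map, Function.comp_def] using hD)
    refine Prod.ext ?_ (Prod.ext ?_ ?_)
    · apply PySem.Dict.ext
      simp only []
      rw [hfold]
      simp [List.map_map, Function.comp_def, List.take_append_drop]
    · simp [← List.sum_append, List.take_append_drop]
    · simp [← List.sum_append, List.take_append_drop]

theorem calculate_patch_counts_for_all_packages_spec_aux (data : List (String × List (String × List (String × List String)))) :
    calculate_patch_counts_for_all_packages data = calculate_patch_counts_for_all_packages_alt data := by
  unfold calculate_patch_counts_for_all_packages calculate_patch_counts_for_all_packages_alt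
  simp only []
  have hnd : (((PySem.Dict.ofList ((PySem.Dict.ofList data).getD "packages_comparison" [])).items).map (·.1)).Nodup := by
    have := PySem.Dict.nodup_keys_ofList (ps := (PySem.Dict.ofList data).getD "packages_comparison" [])
    simpa [PySem.Dict.keys] using this
  rw [pvA_foldl, pvKeysNodupMap _ hnd, pvSolve_eq _ hnd]
  simp

theorem calculate_patch_counts_for_all_packages_spec : Claim_equal_calculate_patch_counts_for_all_packages := by
  intro data _
  exact calculate_patch_counts_for_all_packages_spec_aux data
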